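-- pv_equiv track=rewrite | github.com/lu-christina/persona-subspace | evals/scripts/fix_question_labels.py | extract_final_sentence
-- ===== SOURCE A (Python) =====
-- def extract_final_sentence(prompt):
--     """Extract the final sentence from a prompt.
--
--     The final sentence starts from the end and goes until the first capitalized letter.
--     This works for both role-based prompts and default prompts.
--
--     Special case: For "What should I do?" we also include the second to last sentence.
--     """
--     prompt = prompt.strip()
--     if not prompt:
--         return prompt
--
--     # Start from the end and work backwards to find the start of the final sentence
--     # Look for the first capitalized letter working backwards
--     final_sentence_start = None
--     for i in range(len(prompt) - 1, -1, -1):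
--         char = prompt[i]
--         # If we find a capitalized letter, check if it's the start of a sentence
--         if char.isupper():
--             # Check if this is likely the start of a sentence
--             # (either at the beginning or after punctuation + space)
--             if i == 0 or (i > 0 and prompt[i-1] in '.!?' and (i == 1 or prompt[i-2] == ' ')):
--                 final_sentence_start = i
--                 break
--             # Also check for space before capitalized letter (common sentence boundary)
--             elif i > 0 and prompt[i-1] == ' ':
--                 # Look back further to see if there's punctuation
--                 j = i - 2
--                 while j >= 0 and prompt[j] == ' ':
--                     j -= 1
--                 if j >= 0 and prompt[j] in '.!?':
--                     final_sentence_start = i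
--                     break
--
--     if final_sentence_start is None:
--         # Fallback: return the original prompt if we can't parse it
--         return prompt
--
--     final_sentence = prompt[final_sentence_start:].strip()
--
--     # Special case: if the final sentence is "What should I do?", include the second to last sentence
--     if final_sentence == "What should I do?":
--         # Find the second to last sentence
--         remaining_prompt = prompt[:final_sentence_start].strip()
--         if remaining_prompt:
--             # Find the start of the second to last sentence
--             for i in range(len(remaining_prompt) - 1, -1, -1):
--                 char = remaining_prompt[i]
--                 if char.isupper():
--                     if i == 0 or (i > 0 and remaining_prompt[i-1] in '.!?' and (i == 1 or remaining_prompt[i-2] == ' ')):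
--                         return remaining_prompt[i:].strip() + " " + final_sentence
--                     elif i > 0 and remaining_prompt[i-1] == ' ':
--                         j = i - 2
--                         while j >= 0 and remaining_prompt[j] == ' ':
--                             j -= 1
--                         if j >= 0 and remaining_prompt[j] in '.!?':
--                             return remaining_prompt[i:].strip() + " " + final_sentence
--
--     return final_sentence
-- ===== SOURCE B (Python) =====
-- def _last_start(s):
--     # Punctuation-driven candidate generation: instead of testing every index for
--     # the sentence-start predicate, generate the indices that punctuation marks
--     # (and position 0) can license as sentence starts, and return the largest.
--     cands = []
--     if s and s[0].isupper():
--         cands.append(0)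
--     for p, ch in enumerate(s):
--         if ch in '.!?':
--             # 'X.' or ' .' directly followed by an uppercase letter
--             if p + 1 < len(s) and (p == 0 or s[p-1] == ' ') and s[p+1].isupper():
--                 cands.append(p + 1)
--             # punctuation, then one or more spaces, then an uppercase letter
--             q = p + 1
--             while q < len(s) and s[q] == ' ':
--                 q += 1
--             if q > p + 1 and q < len(s) and s[q].isupper():
--                 cands.append(q)
--     return max(cands) if cands else None
--
-- def extract_final_sentence(prompt):
--     prompt = prompt.strip()
--     if not prompt:
--         return prompt
--     start = _last_start(prompt)
--     if start is None:
--         return prompt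
--     final = prompt[start:].strip()
--     if final == "What should I do?":
--         rest = prompt[:start].strip()
--         if rest:
--             s2 = _last_start(rest)
--             if s2 is not None:
--                 return rest[s2:].strip() + " " + final
--     return final
-- ===== Notes on version B (the rewrite author's own statement) =====
-- stated objective: alternative
-- what changed: A scans every index backwards testing an uppercase/sentence-start predicate (with an inner backward space-skipping loop) and breaks at the first hit; B never tests indices against that predicate: it generates candidate start indices from the punctuation marks themselves (each '.!?' mark, plus position 0, licenses at most two starts, found by a forward space skip) and returns the maximum candidate.
import Mathlib
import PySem

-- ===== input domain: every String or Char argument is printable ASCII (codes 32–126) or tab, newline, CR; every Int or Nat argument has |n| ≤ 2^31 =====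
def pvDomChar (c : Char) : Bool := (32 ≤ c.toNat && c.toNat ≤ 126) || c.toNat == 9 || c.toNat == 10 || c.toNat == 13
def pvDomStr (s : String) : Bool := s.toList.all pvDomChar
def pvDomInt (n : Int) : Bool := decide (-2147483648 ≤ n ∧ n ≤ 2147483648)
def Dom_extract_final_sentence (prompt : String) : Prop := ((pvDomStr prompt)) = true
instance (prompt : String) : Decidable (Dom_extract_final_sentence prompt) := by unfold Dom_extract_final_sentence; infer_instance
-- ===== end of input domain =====

-- B replaces A's backward per-index predicate scan (with its inner space-skipping while loop)
-- by punctuation-driven candidate generation: each '.!?' mark (and position 0) licenses at most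
-- two sentence-start indices, and the largest candidate wins; objective: alternative.

-- 'c in ".!?"' (shared literal of both Pythons)
def inPunct (c : Char) : Bool := c == '.' || c == '!' || c == '?'

-- ===== PORT A =====
-- the inner `j = i-2; while j >= 0 and prompt[j] == ' ': j -= 1` loop: last non-space index ≤ j
def lastNonSpace (cs : List Char) : Nat → Option Nat
  | 0 => if cs.getD 0 ' ' == ' ' then none else some 0
  | j+1 => if cs.getD (j+1) ' ' == ' ' then lastNonSpace cs j else some (j+1)

-- the per-index break condition of A's backward loop (indices used are in range, so getD's
-- default is never consulted; the `2 ≤ i` guard is Python's `j = i-2 ≥ 0` reachability)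
def checkA (cs : List Char) (i : Nat) : Bool :=
  if PySem.Chars.isupper (cs.getD i ' ') then
    if i == 0 || (decide (0 < i) && inPunct (cs.getD (i-1) ' ') && (i == 1 || cs.getD (i-2) ' ' == ' ')) then true
    else if decide (0 < i) && cs.getD (i-1) ' ' == ' ' then
      if 2 ≤ i then
        match lastNonSpace cs (i-2) with
        | some k => inPunct (cs.getD k ' ')
        | none => false
      else false
    else false
  else false

-- `for i in range(len-1, -1, -1): … break` returning the break index
def loopA (cs : List Char) : Nat → Option Nat
  | 0 => if checkA cs 0 then some 0 else none
  | j+1 => if checkA cs (j+1) then some (j+1) else loopA cs j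

def extract_final_sentence (prompt : String) : String :=
  let ps := PySem.Chars.strip prompt.toList
  if ps.isEmpty then String.ofList ps
  else
    match loopA ps (ps.length - 1) with
    | none => String.ofList ps
    | some st =>
      let final := PySem.Chars.strip (ps.drop st)   -- prompt[st:] with 0 ≤ st ≤ len is drop st
      if final = "What should I do?".toList then
        let rem := PySem.Chars.strip (ps.take st)   -- prompt[:st]
        if rem.isEmpty then String.ofList final
        else
          match loopA rem (rem.length - 1) with     -- A's second loop is textually the first again
          | some i => String.ofList (PySem.Chars.strip (rem.drop i) ++ ' ' :: final)
          | none => String.ofList final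
      else String.ofList final

-- ===== PORT B =====
-- the `q = p+1; while q < len(s) and s[q] == ' ': q += 1` loop (fuel = cs.length suffices)
def skipSpaces (cs : List Char) : Nat → Nat → Nat
  | 0, q => q
  | f+1, q => if decide (q < cs.length) && (cs.getD q ' ' == ' ') then skipSpaces cs f (q+1) else q

-- the candidate indices that the punctuation mark at position p licenses
def contribB (cs : List Char) (p : Nat) : List Nat :=
  if inPunct (cs.getD p ' ') then
    (if decide (p + 1 < cs.length) && (p == 0 || cs.getD (p-1) ' ' == ' ')
        && PySem.Chars.isupper (cs.getD (p+1) ' ') then [p+1] else []) ++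
    (let q := skipSpaces cs cs.length (p+1)
     if decide (p + 1 < q) && decide (q < cs.length) && PySem.Chars.isupper (cs.getD q ' ') then [q] else [])
  else []

def candsB (cs : List Char) : List Nat :=
  (List.range cs.length).foldl (fun acc p => acc ++ contribB cs p)
    (if !cs.isEmpty && PySem.Chars.isupper (cs.getD 0 ' ') then [0] else [])

-- `max(cands) if cands else None`
def lastStartB (cs : List Char) : Option Nat := (candsB cs).max?

def extract_final_sentence_alt (prompt : String) : String :=
  let ps := PySem.Chars.strip prompt.toList
  if ps.isEmpty then String.ofList ps
  else
    match lastStartB ps with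
    | none => String.ofList ps
    | some st =>
      let final := PySem.Chars.strip (ps.drop st)
      if final = "What should I do?".toList then
        let rem := PySem.Chars.strip (ps.take st)
        if rem.isEmpty then String.ofList final
        else
          match lastStartB rem with
          | some i => String.ofList (PySem.Chars.strip (rem.drop i) ++ ' ' :: final)
          | none => String.ofList final
      else String.ofList final

-- ===== PRECONDITION & SPEC =====
def Spec_extract_final_sentence (prompt : String) (out : String) : Prop := out = extract_final_sentence_alt prompt
instance (prompt : String) (out : String) : Decidable (Spec_extract_final_sentence prompt out) := by unfold Spec_extract_final_sentence; infer_instance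

-- ===== CLAIM (what is proved, stated in full; the proofs are below) =====
def Claim_equal_extract_final_sentence : Prop := ∀ (prompt : String), Dom_extract_final_sentence prompt → Spec_extract_final_sentence prompt (extract_final_sentence prompt)

-- ===== LEMMAS AND PROOFS =====

theorem isupper_space : PySem.Chars.isupper ' ' = false := by decide

theorem inPunct_ne_space {c : Char} (h : inPunct c = true) : ¬ (c == ' ') = true := by
  unfold inPunct at h
  rcases Bool.or_eq_true_iff.mp h with h | h
  · rcases Bool.or_eq_true_iff.mp h with h | h <;> simp_all
  · simp_all

theorem isupper_ne_space {c : Char} (h : PySem.Chars.isupper c = true) : ¬ (c == ' ') = true := by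
  intro hc
  rw [beq_iff_eq] at hc; subst hc
  rw [isupper_space] at h; exact Bool.false_ne_true h

theorem checkA_lt_length {cs : List Char} {i : Nat} (h : checkA cs i = true) : i < cs.length := by
  by_contra hge
  have hd : cs.getD i ' ' = ' ' := List.getD_eq_default _ _ (by omega)
  unfold checkA at h
  rw [hd, isupper_space] at h
  simp at h

-- characterization of A's inner backward space-skip
theorem lastNonSpace_some {cs : List Char} {j k : Nat} (h : lastNonSpace cs j = some k) :
    k ≤ j ∧ ¬ (cs.getD k ' ' == ' ') = true ∧ ∀ m, k < m → m ≤ j → (cs.getD m ' ' == ' ') = true := by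
  induction j with
  | zero =>
    unfold lastNonSpace at h
    by_cases hc : (cs.getD 0 ' ' == ' ') = true
    · rw [if_pos hc] at h; exact absurd h (by simp)
    · rw [if_neg hc] at h
      injection h with h; subst h
      exact ⟨le_refl _, hc, fun m h1 h2 => by omega⟩
  | succ j ih =>
    unfold lastNonSpace at h
    by_cases hc : (cs.getD (j+1) ' ' == ' ') = true
    · rw [if_pos hc] at h
      obtain ⟨h1, h2, h3⟩ := ih h
      refine ⟨by omega, h2, fun m hm1 hm2 => ?_⟩
      rcases Nat.lt_or_ge m (j+1) with hl | hl
      · exact h3 m hm1 (by omega)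
      · have : m = j+1 := by omega
        subst this; exact hc
    · rw [if_neg hc] at h
      injection h with h; subst h
      exact ⟨le_refl _, hc, fun m h1 h2 => by omega⟩

theorem lastNonSpace_eq_some {cs : List Char} {j p : Nat} (hp : ¬ (cs.getD p ' ' == ' ') = true)
    (hle : p ≤ j) (hsp : ∀ m, p < m → m ≤ j → (cs.getD m ' ' == ' ') = true) :
    lastNonSpace cs j = some p := by
  induction j with
  | zero =>
    have : p = 0 := by omega
    subst this
    unfold lastNonSpace; rw [if_neg hp]
  | succ j ih =>
    unfold lastNonSpace
    rcases Nat.lt_or_ge p (j+1) with hl | hl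
    · rw [if_pos (hsp (j+1) hl (le_refl _))]
      exact ih (by omega) (fun m h1 h2 => hsp m h1 (by omega))
    · have : p = j+1 := by omega
      subst this
      rw [if_neg hp]

-- characterization of B's forward space-skip
theorem skipSpaces_spec (cs : List Char) (f q : Nat) :
    q ≤ skipSpaces cs f q ∧
    (∀ m, q ≤ m → m < skipSpaces cs f q → m < cs.length ∧ (cs.getD m ' ' == ' ') = true) := by
  induction f generalizing q with
  | zero => exact ⟨le_refl _, fun m h1 h2 => by simp [skipSpaces] at h2; omega⟩
  | succ f ih =>
    unfold skipSpaces
    by_cases hc : (decide (q < cs.length) && (cs.getD q ' ' == ' ')) = true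
    · rw [if_pos hc]
      obtain ⟨hq, hcond⟩ := Bool.and_eq_true_iff.mp hc
      obtain ⟨ih1, ih2⟩ := ih (q+1)
      refine ⟨by omega, fun m h1 h2 => ?_⟩
      rcases Nat.lt_or_ge m (q+1) with hl | hl
      · have : m = q := by omega
        subst this; exact ⟨of_decide_eq_true hq, hcond⟩
      · exact ih2 m hl h2
    · rw [if_neg hc]
      exact ⟨le_refl _, fun m h1 h2 => by omega⟩

theorem skipSpaces_eq {cs : List Char} {q r : Nat} (hqr : q ≤ r)
    (hsp : ∀ m, q ≤ m → m < r → (cs.getD m ' ' == ' ') = true)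
    (hr : r < cs.length) (hstop : ¬ (cs.getD r ' ' == ' ') = true)
    {f : Nat} (hf : r ≤ q + f) : skipSpaces cs f q = r := by
  induction f generalizing q with
  | zero =>
    have : q = r := by omega
    subst this; rfl
  | succ f ih =>
    unfold skipSpaces
    rcases Nat.lt_or_ge q r with hl | hl
    · rw [if_pos (by rw [hsp q (le_refl _) hl]; simp; omega)]
      exact ih (by omega) (fun m h1 h2 => hsp m (by omega) h2) (by omega)
    · have : q = r := by omega
      subst this
      rw [if_neg (by intro h; exact hstop (Bool.and_eq_true_iff.mp h).2)]

theorem candsB_eq (cs : List Char) :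
    candsB cs = (if !cs.isEmpty && PySem.Chars.isupper (cs.getD 0 ' ') then [0] else [])
      ++ (List.range cs.length).flatMap (contribB cs) :=
  PySem.List.foldl_append_eq_flatMap _ _ _

-- membership in B's candidate list ↔ A's break condition
theorem mem_candsB {cs : List Char} {i : Nat} : i ∈ candsB cs ↔ checkA cs i = true := by
  rw [candsB_eq, List.mem_append, List.mem_flatMap]
  constructor
  · rintro (h0 | ⟨p, hp, hmem⟩)
    · -- initial candidate 0
      by_cases hc : (!cs.isEmpty && PySem.Chars.isupper (cs.getD 0 ' ')) = true
      · rw [if_pos hc] at h0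
        have : i = 0 := by simpa using h0
        subst this
        unfold checkA
        rw [if_pos (Bool.and_eq_true_iff.mp hc).2]
        simp
      · rw [if_neg hc] at h0; simp at h0
    · -- candidate from punctuation at p
      unfold contribB at hmem
      by_cases hpunct : inPunct (cs.getD p ' ') = true
      · rw [if_pos hpunct, List.mem_append] at hmem
        rcases hmem with hmem | hmem
        · -- i = p+1, punctuation directly before
          by_cases hc : (decide (p + 1 < cs.length) && (p == 0 || cs.getD (p-1) ' ' == ' ')
              && PySem.Chars.isupper (cs.getD (p+1) ' ')) = true
          · rw [if_pos hc] at hmem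
            have hi : i = p + 1 := by simpa using hmem
            subst hi
            obtain ⟨h12, h3⟩ := Bool.and_eq_true_iff.mp hc
            obtain ⟨h1, h2⟩ := Bool.and_eq_true_iff.mp h12
            unfold checkA
            rw [if_pos h3]
            have hcond : (p + 1 == 0 || (decide (0 < p + 1) && inPunct (cs.getD (p+1-1) ' ')
                && (p + 1 == 1 || cs.getD (p+1-2) ' ' == ' '))) = true := by
              simp only [Nat.add_sub_cancel, Bool.or_eq_true, Bool.and_eq_true,
                decide_eq_true_eq, beq_iff_eq]
              right
              refine ⟨⟨by omega, hpunct⟩, ?_⟩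
              rcases Nat.eq_zero_or_pos p with hp0 | hp0
              · left; omega
              · right
                rcases Bool.or_eq_true_iff.mp h2 with h | h
                · exact absurd (by simpa using h) (by omega)
                · have e : p + 1 - 2 = p - 1 := by omega
                  rw [e]; exact beq_iff_eq.mp h
            rw [if_pos hcond]
          · rw [if_neg hc] at hmem; simp at hmem
        · -- i = q, end of the space run after p
          by_cases hc : (decide (p + 1 < skipSpaces cs cs.length (p+1))
              && decide (skipSpaces cs cs.length (p+1) < cs.length)
              && PySem.Chars.isupper (cs.getD (skipSpaces cs cs.length (p+1)) ' ')) = true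
          · rw [if_pos hc] at hmem
            have hi : i = skipSpaces cs cs.length (p+1) := by simpa using hmem
            obtain ⟨h12, hup⟩ := Bool.and_eq_true_iff.mp hc
            obtain ⟨h1, h2⟩ := Bool.and_eq_true_iff.mp h12
            have h1' : p + 1 < skipSpaces cs cs.length (p+1) := of_decide_eq_true h1
            obtain ⟨hs1, hs2⟩ := skipSpaces_spec cs cs.length (p+1)
            subst hi
            set q := skipSpaces cs cs.length (p+1) with hq
            unfold checkA
            rw [if_pos hup]
            have hqm1 : (cs.getD (q-1) ' ' == ' ') = true := (hs2 (q-1) (by omega) (by omega)).2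
            have hnotb2 : (q == 0 || (decide (0 < q) && inPunct (cs.getD (q-1) ' ')
                && (q == 1 || cs.getD (q-2) ' ' == ' '))) = false := by
              have hq0 : (q == 0) = false := by simp; omega
              have hnp : inPunct (cs.getD (q-1) ' ') = false := by
                by_contra h
                exact inPunct_ne_space (Bool.of_not_eq_false h) hqm1
              rw [hq0, hnp]
              simp
            rw [hnotb2, if_neg (by simp)]
            rw [if_pos (by rw [hqm1]; simp; omega), if_pos (by omega)]
            rw [lastNonSpace_eq_some (inPunct_ne_space hpunct) (by omega)
              (fun m hm1 hm2 => (hs2 m (by omega) (by omega)).2)]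
            exact hpunct
          · rw [if_neg hc] at hmem; simp at hmem
      · rw [if_neg hpunct] at hmem; simp at hmem
  · intro h
    have hlen := checkA_lt_length h
    unfold checkA at h
    by_cases hup : PySem.Chars.isupper (cs.getD i ' ') = true
    · rw [if_pos hup] at h
      by_cases hb2 : (i == 0 || (decide (0 < i) && inPunct (cs.getD (i-1) ' ')
          && (i == 1 || cs.getD (i-2) ' ' == ' '))) = true
      · rcases Bool.or_eq_true_iff.mp hb2 with h0 | hb
        · -- i = 0: the initial candidate
          left
          have : i = 0 := by simpa using h0
          subst this
          rw [if_pos (by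
            cases cs with
            | nil => simp at hlen
            | cons a t => simpa using hup)]
          simp
        · -- punctuation at p = i-1
          right
          obtain ⟨hb1, hb3⟩ := Bool.and_eq_true_iff.mp hb
          obtain ⟨hpos, hpunct⟩ := Bool.and_eq_true_iff.mp hb1
          have hpos' : 0 < i := of_decide_eq_true hpos
          refine ⟨i - 1, List.mem_range.mpr (by omega), ?_⟩
          unfold contribB
          rw [if_pos hpunct, List.mem_append]
          left
          have hcond : (decide (i - 1 + 1 < cs.length) && (i - 1 == 0 || cs.getD (i-1-1) ' ' == ' ')
              && PySem.Chars.isupper (cs.getD (i-1+1) ' ')) = true := by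
            have e1 : i - 1 + 1 = i := by omega
            rw [e1]
            simp only [Bool.and_eq_true, Bool.or_eq_true, decide_eq_true_eq, beq_iff_eq]
            refine ⟨⟨hlen, ?_⟩, hup⟩
            rcases Bool.or_eq_true_iff.mp hb3 with h1 | h1
            · left
              have : i = 1 := by simpa using h1
              omega
            · right
              have e2 : i - 1 - 1 = i - 2 := by omega
              rw [e2]; exact beq_iff_eq.mp h1
          rw [if_pos hcond]
          simp; omega
      · -- space run back to a punctuation mark
        rw [if_neg hb2] at h
        by_cases hsp1 : (decide (0 < i) && (cs.getD (i-1) ' ' == ' ')) = true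
        · rw [if_pos hsp1] at h
          by_cases h2i : 2 ≤ i
          · rw [if_pos h2i] at h
            cases hls : lastNonSpace cs (i-2) with
            | none => rw [hls] at h; simp at h
            | some k =>
              rw [hls] at h
              obtain ⟨hk1, hk2, hk3⟩ := lastNonSpace_some hls
              right
              refine ⟨k, List.mem_range.mpr (by omega), ?_⟩
              unfold contribB
              rw [if_pos h, List.mem_append]
              right
              have hspace : ∀ m, k + 1 ≤ m → m < i → (cs.getD m ' ' == ' ') = true := by
                intro m h1 h2
                rcases Nat.lt_or_ge m (i-1) with hl | hl
                · exact hk3 m (by omega) (by omega)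
                · have : m = i - 1 := by omega
                  subst this
                  exact (Bool.and_eq_true_iff.mp hsp1).2
              have hskip : skipSpaces cs cs.length (k+1) = i :=
                skipSpaces_eq (by omega) hspace hlen (isupper_ne_space hup) (by omega)
              show i ∈ (if decide (k + 1 < skipSpaces cs cs.length (k+1))
                  && decide (skipSpaces cs cs.length (k+1) < cs.length)
                  && PySem.Chars.isupper (cs.getD (skipSpaces cs cs.length (k+1)) ' ')
                then [skipSpaces cs cs.length (k+1)] else [])
              rw [hskip, if_pos (by
                simp only [Bool.and_eq_true, decide_eq_true_eq]
                exact ⟨⟨by omega, hlen⟩, hup⟩)]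
              simp
          · rw [if_neg h2i] at h; simp at h
        · rw [if_neg hsp1] at h; simp at h
    · rw [if_neg hup] at h; simp at h

-- loopA returns none iff nothing ≤ j qualifies, and otherwise the greatest qualifying index
theorem loopA_none {cs : List Char} {j : Nat} (h : loopA cs j = none) :
    ∀ k, k ≤ j → checkA cs k = false := by
  induction j with
  | zero =>
    unfold loopA at h
    intro k hk
    have : k = 0 := by omega
    subst this
    by_cases hc : checkA cs 0 = true
    · rw [if_pos hc] at h; simp at h
    · simpa using hc
  | succ j ih =>
    unfold loopA at h
    by_cases hc : checkA cs (j+1) = true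
    · rw [if_pos hc] at h; simp at h
    · rw [if_neg hc] at h
      intro k hk
      rcases Nat.lt_or_ge k (j+1) with hl | hl
      · exact ih h k (by omega)
      · have : k = j+1 := by omega
        subst this; simpa using hc

theorem loopA_some {cs : List Char} {j m : Nat} (h : loopA cs j = some m) :
    m ≤ j ∧ checkA cs m = true ∧ ∀ k, m < k → k ≤ j → checkA cs k = false := by
  induction j with
  | zero =>
    unfold loopA at h
    by_cases hc : checkA cs 0 = true
    · rw [if_pos hc] at h
      injection h with h; subst h
      exact ⟨le_refl _, hc, fun k h1 h2 => by omega⟩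
    · rw [if_neg hc] at h; simp at h
  | succ j ih =>
    unfold loopA at h
    by_cases hc : checkA cs (j+1) = true
    · rw [if_pos hc] at h
      injection h with h; subst h
      exact ⟨le_refl _, hc, fun k h1 h2 => by omega⟩
    · rw [if_neg hc] at h
      obtain ⟨h1, h2, h3⟩ := ih h
      refine ⟨by omega, h2, fun k hk1 hk2 => ?_⟩
      rcases Nat.lt_or_ge k (j+1) with hl | hl
      · exact h3 k hk1 (by omega)
      · have : k = j+1 := by omega
        subst this; simpa using hc

theorem lastStartB_eq (cs : List Char) (h : ¬ cs.isEmpty) :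
    lastStartB cs = loopA cs (cs.length - 1) := by
  have hlen : 0 < cs.length := by
    cases cs with
    | nil => simp at h
    | cons a t => simp
  unfold lastStartB
  cases hl : loopA cs (cs.length - 1) with
  | none =>
    rw [List.max?_eq_none_iff]
    rw [List.eq_nil_iff_forall_not_mem]
    intro x hx
    have hch := mem_candsB.mp hx
    have := loopA_none hl x (by have := checkA_lt_length hch; omega)
    rw [hch] at this
    simp at this
  | some m =>
    obtain ⟨h1, h2, h3⟩ := loopA_some hl
    rw [List.max?_eq_some_iff]
    refine ⟨mem_candsB.mpr h2, fun x hx => ?_⟩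
    have hch := mem_candsB.mp hx
    by_contra hgt
    have hxl := checkA_lt_length hch
    have := h3 x (by omega) (by omega)
    rw [hch] at this
    simp at this

-- ===== VERDICT (by name: the statement is the Claim_ definition above) =====
theorem extract_final_sentence_spec : Claim_equal_extract_final_sentence := by
  intro prompt _
  unfold Spec_extract_final_sentence extract_final_sentence extract_final_sentence_alt
  by_cases h : (PySem.Chars.strip prompt.toList).isEmpty
  · simp only [h, if_true]
  · simp only [h, lastStartB_eq _ h]
    cases hl : loopA (PySem.Chars.strip prompt.toList) ((PySem.Chars.strip prompt.toList).length - 1) with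
    | none => rfl
    | some st =>
      by_cases hf : PySem.Chars.strip (List.drop st (PySem.Chars.strip prompt.toList)) = "What should I do?".toList
      · by_cases hr : (PySem.Chars.strip (List.take st (PySem.Chars.strip prompt.toList))).isEmpty
        · simp only [hf, hr, if_true]
        · simp [hf, hr, lastStartB_eq _ hr]
      · have hf' : ¬ PySem.Chars.strip (List.drop st (PySem.Chars.strip prompt.toList))
            = ['W','h','a','t',' ','s','h','o','u','l','d',' ','I',' ','d','o','?'] := by
          simpa using hf
        simp [hf']
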